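-- pv_equiv track=rewrite | github.com/Aviroop07/NL2DATA | NL2DATA/orchestration/graphs/phase9.py | _group_attributes_by_type
-- ===== SOURCE A (Python) =====
-- from typing import Dict, Any, List, Set
--
-- def _group_attributes_by_type(
--     independent_attributes: Dict[str, List[Dict[str, Any]]],
--     data_types: Dict[str, Dict[str, Dict[str, Any]]]
-- ) -> Dict[str, List[Dict[str, Any]]]:
--     """
--     Group independent attributes by data type (numerical, text, boolean).
--
--     Args:
--         independent_attributes: Dictionary mapping table_name -> list of attribute metadata
--         data_types: Dictionary mapping entity -> attribute -> type info
--
--     Returns: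
--         Dictionary with keys: "numerical", "text", "boolean"
--     """
--     numerical_attrs = []
--     text_attrs = []
--     boolean_attrs = []
--
--     for table_name, attrs in independent_attributes.items():
--         for attr in attrs:
--             attr_name = attr.get("attribute_name", "")
--             entity_name = attr.get("entity_name", table_name)
--
--             # Get data type
--             type_info = None
--             if entity_name in data_types:
--                 entity_types = data_types[entity_name]
--                 if attr_name in entity_types:
--                     type_info = entity_types[attr_name]
--
--             # Determine type from type_info or type_hint
--             sql_type = None
--             if type_info:
--                 sql_type = type_info.get("sql_type") or type_info.get("type")
--
--             if not sql_type:
--                 type_hint = attr.get("type_hint", "")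
--                 if type_hint:
--                     sql_type = type_hint
--
--             # Classify attribute
--             sql_type_lower = (sql_type or "").lower()
--
--             if any(t in sql_type_lower for t in ["int", "float", "decimal", "numeric", "real", "double", "number"]):
--                 numerical_attrs.append(attr)
--             elif any(t in sql_type_lower for t in ["bool", "boolean"]):
--                 boolean_attrs.append(attr)
--             else:
--                 # Default to text for string types and unknown types
--                 text_attrs.append(attr)
--
--     return {
--         "numerical": numerical_attrs,
--         "text": text_attrs,
--         "boolean": boolean_attrs,
--     }
-- ===== SOURCE B (Python) =====
-- _RULES = (
--     ("numerical", ("int", "float", "decimal", "numeric", "real", "double", "number")),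
--     ("boolean", ("bool", "boolean")),
-- )
--
--
-- def _classify_type(raw):
--     """Category of one raw SQL type string via an ordered rule table."""
--     s = raw.lower()
--     for cat, keys in _RULES:
--         if any(k in s for k in keys):
--             return cat
--     return "text"
--
--
-- def _group_attributes_by_type(independent_attributes, data_types):
--     # Precompute, once per declared (entity, attribute), the category its declared
--     # type resolves to (None when the declaration does not determine one), so the
--     # per-attribute work is a plain index lookup instead of resolution + keyword scan.
--     index = {
--         entity: {
--             name: (_classify_type(resolved) if resolved else None)
--             for name, ti in entity_types.items()
--             for resolved in [(ti.get("sql_type") or ti.get("type")) if ti else None]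
--         }
--         for entity, entity_types in data_types.items()
--     }
--
--     groups = {"numerical": [], "text": [], "boolean": []}
--     for table_name, attrs in independent_attributes.items():
--         for attr in attrs:
--             cat = index.get(attr.get("entity_name", table_name), {}).get(
--                 attr.get("attribute_name", "")
--             )
--             if cat is None:
--                 cat = _classify_type(attr.get("type_hint", ""))
--             groups[cat].append(attr)
--     return groups
-- ===== Notes on version B (the rewrite author's own statement) =====
-- stated objective: alternative
-- what changed: B precomputes from data_types a two-level index mapping (entity, attribute) to its already-classified category (via an ordered rule table), so each attribute is grouped by a plain index lookup (falling back to classifying its type_hint) into a dict of category lists, instead of A's per-attribute type resolution or-chain plus keyword scan into three named accumulator lists.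
import Mathlib
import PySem

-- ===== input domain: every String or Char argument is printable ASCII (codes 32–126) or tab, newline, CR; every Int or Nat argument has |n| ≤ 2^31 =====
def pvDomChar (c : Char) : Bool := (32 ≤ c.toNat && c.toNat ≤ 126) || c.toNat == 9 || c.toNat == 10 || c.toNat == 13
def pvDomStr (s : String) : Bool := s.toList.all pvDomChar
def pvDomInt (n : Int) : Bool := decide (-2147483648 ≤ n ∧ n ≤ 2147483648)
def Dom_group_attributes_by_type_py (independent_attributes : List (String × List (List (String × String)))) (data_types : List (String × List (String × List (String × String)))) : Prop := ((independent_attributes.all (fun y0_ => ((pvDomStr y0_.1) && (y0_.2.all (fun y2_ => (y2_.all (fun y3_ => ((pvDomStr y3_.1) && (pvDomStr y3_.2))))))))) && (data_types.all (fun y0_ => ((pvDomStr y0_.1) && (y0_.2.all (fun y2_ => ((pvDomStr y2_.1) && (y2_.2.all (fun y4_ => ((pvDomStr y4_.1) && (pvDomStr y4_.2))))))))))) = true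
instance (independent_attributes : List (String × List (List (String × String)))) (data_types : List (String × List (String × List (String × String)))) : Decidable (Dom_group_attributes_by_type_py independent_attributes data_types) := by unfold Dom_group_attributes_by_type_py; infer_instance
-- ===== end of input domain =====

-- B precomputes a two-level (entity → attribute → category) index from data_types, so each
-- attribute is grouped by an index lookup (fallback: classify its type_hint) into a dict of
-- category lists; a different data structure, no speed claim.

-- ===== PORT A =====
-- Python truthiness of `sql_type` (None or "" are falsy)
def pvTruthyA (o : Option String) : Bool :=
  match o with
  | some s => s ≠ ""
  | none => false

-- the sql_type resolution of A's loop body, step for step, ending in the lowered string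
def pvSqlLowerA (data_types : List (String × List (String × List (String × String))))
    (table_name : String) (attr : List (String × String)) : String :=
  let attr_name := PySem.Dict.getD (PySem.Dict.mk attr) "attribute_name" ""
  let entity_name := PySem.Dict.getD (PySem.Dict.mk attr) "entity_name" table_name
  let type_info : Option (List (String × String)) :=
    match PySem.Dict.get? (PySem.Dict.mk data_types) entity_name with
    | some entity_types => PySem.Dict.get? (PySem.Dict.mk entity_types) attr_name
    | none => none
  let sql_type : Option String :=
    match type_info with
    | some ti =>
        if ti.isEmpty then none           -- `if type_info:` — an empty dict is falsy
        else
          match PySem.Dict.get? (PySem.Dict.mk ti) "sql_type" with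
          | some s => if s ≠ "" then some s else PySem.Dict.get? (PySem.Dict.mk ti) "type"
          | none => PySem.Dict.get? (PySem.Dict.mk ti) "type"
    | none => none
  let sql_type :=
    if pvTruthyA sql_type then sql_type
    else
      let type_hint := PySem.Dict.getD (PySem.Dict.mk attr) "type_hint" ""
      if type_hint ≠ "" then some type_hint else sql_type
  PySem.Str.lower (sql_type.getD "")

-- the classification branch of A's loop body: append the attribute to one of the three lists
def pvStepA (data_types : List (String × List (String × List (String × String)))) (table_name : String)
    (st : List (List (String × String)) × List (List (String × String)) × List (List (String × String)))
    (attr : List (String × String)) :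
    List (List (String × String)) × List (List (String × String)) × List (List (String × String)) :=
  let sql_type_lower := pvSqlLowerA data_types table_name attr
  if ["int", "float", "decimal", "numeric", "real", "double", "number"].any
      (fun t => PySem.Str.isIn t sql_type_lower) then
    (st.1 ++ [attr], st.2.1, st.2.2)
  else if ["bool", "boolean"].any (fun t => PySem.Str.isIn t sql_type_lower) then
    (st.1, st.2.1, st.2.2 ++ [attr])
  else
    (st.1, st.2.1 ++ [attr], st.2.2)

def group_attributes_by_type_py (independent_attributes : List (String × List (List (String × String)))) (data_types : List (String × List (String × List (String × String)))) : List (String × List (List (String × String))) :=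
  let st := independent_attributes.foldl
    (fun st p => p.2.foldl (pvStepA data_types p.1) st) ([], [], [])
  [("numerical", st.1), ("text", st.2.1), ("boolean", st.2.2)]

-- ===== PORT B =====
def pvRulesB : List (String × List String) :=
  [("numerical", ["int", "float", "decimal", "numeric", "real", "double", "number"]),
   ("boolean", ["bool", "boolean"])]

-- _classify_type: category of one raw SQL type string via the ordered rule table
def pvClassifyB (raw : String) : String :=
  let s := PySem.Str.lower raw
  match pvRulesB.find? (fun r => r.2.any (fun k => PySem.Str.isIn k s)) with
  | some r => r.1
  | none => "text"

-- `(ti.get("sql_type") or ti.get("type")) if ti else None`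
def pvResolveB (ti : List (String × String)) : Option String :=
  if ti.isEmpty then none
  else
    match PySem.Dict.get? (PySem.Dict.mk ti) "sql_type" with
    | some s => if s = "" then PySem.Dict.get? (PySem.Dict.mk ti) "type" else some s
    | none => PySem.Dict.get? (PySem.Dict.mk ti) "type"

-- `_classify_type(resolved) if resolved else None`
def pvOptCatB (ti : List (String × String)) : Option String :=
  match pvResolveB ti with
  | some r => if r = "" then none else some (pvClassifyB r)
  | none => none

-- the inner dict comprehension: one entity's attribute → optional category dict
def pvInnerB (entity_types : List (String × List (String × String))) :
    PySem.Dict String (Option String) :=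
  PySem.Dict.mk (entity_types.map (fun q => (q.1, pvOptCatB q.2)))

-- the outer dict comprehension building the index
def pvIndexB (data_types : List (String × List (String × List (String × String)))) :
    PySem.Dict String (PySem.Dict String (Option String)) :=
  PySem.Dict.mk (data_types.map (fun p => (p.1, pvInnerB p.2)))

-- `index.get(entity, {}).get(name)` then the type_hint fallback
def pvCatB (idx : PySem.Dict String (PySem.Dict String (Option String)))
    (table_name : String) (attr : List (String × String)) : String :=
  let cat0 : Option String :=
    match PySem.Dict.get? idx (PySem.Dict.getD (PySem.Dict.mk attr) "entity_name" table_name) with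
    | some m => (PySem.Dict.get? m (PySem.Dict.getD (PySem.Dict.mk attr) "attribute_name" "")).getD none
    | none => none
  match cat0 with
  | some c => c
  | none => pvClassifyB (PySem.Dict.getD (PySem.Dict.mk attr) "type_hint" "")

def group_attributes_by_type_py_alt (independent_attributes : List (String × List (List (String × String)))) (data_types : List (String × List (String × List (String × String)))) : List (String × List (List (String × String))) :=
  let idx := pvIndexB data_types
  (independent_attributes.foldl
    (fun g p => p.2.foldl
      (fun g attr => PySem.Dict.modify g (pvCatB idx p.1 attr) [] (· ++ [attr])) g)
    (PySem.Dict.mk [("numerical", []), ("text", []), ("boolean", [])])).items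

-- ===== PRECONDITION & SPEC =====
def Spec_group_attributes_by_type_py (independent_attributes : List (String × List (List (String × String)))) (data_types : List (String × List (String × List (String × String)))) (out : List (String × List (List (String × String)))) : Prop := out = group_attributes_by_type_py_alt independent_attributes data_types
instance (independent_attributes : List (String × List (List (String × String)))) (data_types : List (String × List (String × List (String × String)))) (out : List (String × List (List (String × String)))) : Decidable (Spec_group_attributes_by_type_py independent_attributes data_types out) := by unfold Spec_group_attributes_by_type_py; infer_instance

-- ===== CLAIM =====
def Claim_equal_group_attributes_by_type_py : Prop := ∀ (independent_attributes : List (String × List (List (String × String)))) (data_types : List (String × List (String × List (String × String)))), Dom_group_attributes_by_type_py independent_attributes data_types → Spec_group_attributes_by_type_py independent_attributes data_types (group_attributes_by_type_py independent_attributes data_types)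

-- ===== LEMMAS AND PROOFS =====

-- the three-way classification of an (already lowered) type string, as a plain function
def pvClassOf (s : String) : String :=
  if ["int", "float", "decimal", "numeric", "real", "double", "number"].any
      (fun t => PySem.Str.isIn t s) then "numerical"
  else if ["bool", "boolean"].any (fun t => PySem.Str.isIn t s) then "boolean"
  else "text"

-- B's rule-table classifier is pvClassOf of the lowered string
lemma pvClassifyB_eq (raw : String) : pvClassifyB raw = pvClassOf (PySem.Str.lower raw) := by
  unfold pvClassifyB pvClassOf pvRulesB
  generalize PySem.Str.lower raw = s
  cases hn : ["int", "float", "decimal", "numeric", "real", "double", "number"].any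
      (fun t => PySem.Str.isIn t s) with
  | true => simp_all
  | false =>
    cases hb : ["bool", "boolean"].any (fun t => PySem.Str.isIn t s) with
    | true => simp_all
    | false => simp_all

-- first-match lookup commutes with a value-only map of the association list
lemma get?_mk_map {ν ν' : Type} (g : ν → ν') (l : List (String × ν)) (e : String) :
    PySem.Dict.get? (PySem.Dict.mk (l.map (fun p => (p.1, g p.2)))) e
      = (PySem.Dict.get? (PySem.Dict.mk l) e).map g := by
  induction l with
  | nil => rfl
  | cons p rest ih =>
    obtain ⟨k, v⟩ := p
    simp only [List.map_cons, PySem.Dict.get?_mk_cons]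
    by_cases h : (k == e) = true <;> simp [h, ih]

-- lookup in the precomputed index is lookup in data_types with the per-entry transform mapped over
lemma get?_indexB (dt : List (String × List (String × List (String × String)))) (e : String) :
    PySem.Dict.get? (pvIndexB dt) e
      = (PySem.Dict.get? (PySem.Dict.mk dt) e).map pvInnerB := by
  unfold pvIndexB
  exact get?_mk_map pvInnerB dt e

-- the precomputed index looked up for one attribute gives exactly A's classification
lemma pvCatB_eq (dt : List (String × List (String × List (String × String))))
    (tn : String) (attr : List (String × String)) :
    pvCatB (pvIndexB dt) tn attr = pvClassOf (pvSqlLowerA dt tn attr) := by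
  unfold pvCatB pvSqlLowerA
  rw [get?_indexB]
  cases h1 : PySem.Dict.get? (PySem.Dict.mk dt) (PySem.Dict.getD (PySem.Dict.mk attr) "entity_name" tn) with
  | none => simp only [h1, Option.map_none, pvTruthyA]; split_ifs <;> simp_all [pvClassifyB_eq]
  | some et =>
    simp only [h1, Option.map_some, pvInnerB]
    rw [get?_mk_map pvOptCatB]
    cases h2 : PySem.Dict.get? (PySem.Dict.mk et) (PySem.Dict.getD (PySem.Dict.mk attr) "attribute_name" "") with
    | none => simp only [Option.map_none, Option.getD_none, pvTruthyA]
              split_ifs <;> simp_all [pvClassifyB_eq]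
    | some ti =>
      simp only [Option.map_some, Option.getD_some, pvOptCatB, pvResolveB, pvTruthyA]
      by_cases hti : ti.isEmpty = true
      · simp only [if_pos hti]; split_ifs <;> simp_all [pvClassifyB_eq]
      · simp only [if_neg hti]
        cases h3 : PySem.Dict.get? (PySem.Dict.mk ti) "sql_type" with
        | none =>
          cases h4 : PySem.Dict.get? (PySem.Dict.mk ti) "type" with
          | none => split_ifs <;> simp_all [pvClassifyB_eq]
          | some t => split_ifs <;> simp_all [pvClassifyB_eq]
        | some s0 =>
          cases h4 : PySem.Dict.get? (PySem.Dict.mk ti) "type" with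
          | none => by_cases hs0 : s0 = "" <;> split_ifs <;> simp_all [pvClassifyB_eq]
          | some t => by_cases hs0 : s0 = "" <;> split_ifs <;> simp_all [pvClassifyB_eq]

-- pvClassOf takes one of the three category names
lemma pvClassOf_mem (s : String) :
    pvClassOf s = "numerical" ∨ pvClassOf s = "text" ∨ pvClassOf s = "boolean" := by
  unfold pvClassOf; split_ifs <;> simp

-- A's step appends to the list named by the classification
lemma pvStepA_classify (dt : List (String × List (String × List (String × String))))
    (tn : String) (st : List (List (String × String)) × List (List (String × String)) × List (List (String × String)))
    (attr : List (String × String)) :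
    pvStepA dt tn st attr =
      (st.1 ++ if pvClassOf (pvSqlLowerA dt tn attr) = "numerical" then [attr] else [],
       st.2.1 ++ if pvClassOf (pvSqlLowerA dt tn attr) = "text" then [attr] else [],
       st.2.2 ++ if pvClassOf (pvSqlLowerA dt tn attr) = "boolean" then [attr] else []) := by
  unfold pvStepA pvClassOf
  generalize pvSqlLowerA dt tn attr = s
  cases hn : ["int", "float", "decimal", "numeric", "real", "double", "number"].any
      (fun t => PySem.Str.isIn t s) with
  | true => simp_all
  | false =>
    cases hb : ["bool", "boolean"].any (fun t => PySem.Str.isIn t s) with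
    | true => simp_all
    | false => simp_all

-- inner loop of A over one table's attributes, with an open accumulator
lemma pvFoldA_inner (dt : List (String × List (String × List (String × String))))
    (tn : String) (attrs : List (List (String × String)))
    (st : List (List (String × String)) × List (List (String × String)) × List (List (String × String))) :
    attrs.foldl (pvStepA dt tn) st =
      (st.1 ++ (attrs.filter (fun a => pvClassOf (pvSqlLowerA dt tn a) == "numerical")),
       st.2.1 ++ (attrs.filter (fun a => pvClassOf (pvSqlLowerA dt tn a) == "text")),
       st.2.2 ++ (attrs.filter (fun a => pvClassOf (pvSqlLowerA dt tn a) == "boolean"))) := by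
  induction attrs generalizing st with
  | nil => simp
  | cons a rest ih =>
    rw [List.foldl_cons, pvStepA_classify, ih]
    simp only [List.filter_cons]
    split_ifs <;> simp_all

-- outer loop of A over all tables
lemma pvFoldA_outer (dt : List (String × List (String × List (String × String))))
    (ia : List (String × List (List (String × String))))
    (st : List (List (String × String)) × List (List (String × String)) × List (List (String × String))) :
    ia.foldl (fun st p => p.2.foldl (pvStepA dt p.1) st) st =
      (st.1 ++ ia.flatMap (fun p => p.2.filter (fun a => pvClassOf (pvSqlLowerA dt p.1 a) == "numerical")),
       st.2.1 ++ ia.flatMap (fun p => p.2.filter (fun a => pvClassOf (pvSqlLowerA dt p.1 a) == "text")),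
       st.2.2 ++ ia.flatMap (fun p => p.2.filter (fun a => pvClassOf (pvSqlLowerA dt p.1 a) == "boolean"))) := by
  induction ia generalizing st with
  | nil => simp
  | cons p rest ih =>
    rw [List.foldl_cons, pvFoldA_inner, ih]
    simp [List.append_assoc]

-- modify on the three-key groups dict, one equation per category (all definitional)
lemma pvModify_num (n t b : List (List (String × String))) (f : List (List (String × String)) → List (List (String × String))) :
    (PySem.Dict.mk [("numerical", n), ("text", t), ("boolean", b)]).modify "numerical" [] f
      = PySem.Dict.mk [("numerical", f n), ("text", t), ("boolean", b)] := rfl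
lemma pvModify_text (n t b : List (List (String × String))) (f : List (List (String × String)) → List (List (String × String))) :
    (PySem.Dict.mk [("numerical", n), ("text", t), ("boolean", b)]).modify "text" [] f
      = PySem.Dict.mk [("numerical", n), ("text", f t), ("boolean", b)] := rfl
lemma pvModify_bool (n t b : List (List (String × String))) (f : List (List (String × String)) → List (List (String × String))) :
    (PySem.Dict.mk [("numerical", n), ("text", t), ("boolean", b)]).modify "boolean" [] f
      = PySem.Dict.mk [("numerical", n), ("text", t), ("boolean", f b)] := rfl

-- inner loop of B over one table's attributes: the groups dict accumulates the three filters
lemma pvFoldB_inner (C : List (String × String) → String)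
    (hC : ∀ a, C a = "numerical" ∨ C a = "text" ∨ C a = "boolean")
    (attrs : List (List (String × String))) (n t b : List (List (String × String))) :
    attrs.foldl (fun g attr => PySem.Dict.modify g (C attr) [] (· ++ [attr]))
      (PySem.Dict.mk [("numerical", n), ("text", t), ("boolean", b)]) =
      PySem.Dict.mk [("numerical", n ++ attrs.filter (fun a => C a == "numerical")),
                     ("text", t ++ attrs.filter (fun a => C a == "text")),
                     ("boolean", b ++ attrs.filter (fun a => C a == "boolean"))] := by
  induction attrs generalizing n t b with
  | nil => simp
  | cons a rest ih =>
    rw [List.foldl_cons]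
    rcases hC a with h | h | h
    · rw [h, pvModify_num, ih]; simp [h]
    · rw [h, pvModify_text, ih]; simp [h]
    · rw [h, pvModify_bool, ih]; simp [h]

-- outer loop of B over all tables
lemma pvFoldB_outer (C : String → List (String × String) → String)
    (hC : ∀ tn a, C tn a = "numerical" ∨ C tn a = "text" ∨ C tn a = "boolean")
    (ia : List (String × List (List (String × String)))) (n t b : List (List (String × String))) :
    ia.foldl (fun g p => p.2.foldl (fun g attr => PySem.Dict.modify g (C p.1 attr) [] (· ++ [attr])) g)
      (PySem.Dict.mk [("numerical", n), ("text", t), ("boolean", b)]) =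
      PySem.Dict.mk [("numerical", n ++ ia.flatMap (fun p => p.2.filter (fun a => C p.1 a == "numerical"))),
                     ("text", t ++ ia.flatMap (fun p => p.2.filter (fun a => C p.1 a == "text"))),
                     ("boolean", b ++ ia.flatMap (fun p => p.2.filter (fun a => C p.1 a == "boolean")))] := by
  induction ia generalizing n t b with
  | nil => simp
  | cons p rest ih =>
    rw [List.foldl_cons, pvFoldB_inner (C p.1) (hC p.1), ih]
    simp [List.append_assoc]

-- ===== VERDICT =====
theorem group_attributes_by_type_py_spec : Claim_equal_group_attributes_by_type_py := by
  intro ia dt _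
  unfold Spec_group_attributes_by_type_py
  simp only [group_attributes_by_type_py, group_attributes_by_type_py_alt]
  rw [pvFoldA_outer,
    pvFoldB_outer (fun tn a => pvCatB (pvIndexB dt) tn a)
      (fun tn a => by simp only [pvCatB_eq]; exact pvClassOf_mem _)]
  simp only [pvCatB_eq, List.nil_append]
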